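-- pv_equiv track=rewrite | github.com/aaatipamula/210_assignments | AnikethAatipamula_Assignment3/AnikethAatipamula_Assignment3.py | is_antisymmetric
-- ===== SOURCE A (Python) =====
-- Relation = set[tuple[int, int]]
--
-- def is_antisymmetric(R: Relation, A: set) -> bool:
--     # Create a second copy of the set
--     B = A.copy()
--     # Generate pairs of a and b that and unique
--     for a in A:
--         for b in A:
--             if (a, b) in R and (b, a) in R: # concept take from lecture and simplified using propositional logic
--                 return False
--         B.remove(a) # makes sure no overlapping pairs are made
--     return True
-- ===== SOURCE B (Python) =====
-- def is_antisymmetric(R, A):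
--     # Build the reversed relation, intersect with R, then check that no
--     # offending pair has both coordinates in A.
--     rev = {(b, a) for (a, b) in R}
--     overlap = R & rev
--     return all(not (a in A and b in A) for (a, b) in overlap)
-- ===== Notes on version B (the rewrite author's own statement) =====
-- stated objective: faster
-- what changed: Replaces A's nested A-by-A scan (plus an incidental shrinking copy B) by building the reversed relation as a set, intersecting it with R, and checking that no pair of the intersection has both coordinates in A.
import Mathlib
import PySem

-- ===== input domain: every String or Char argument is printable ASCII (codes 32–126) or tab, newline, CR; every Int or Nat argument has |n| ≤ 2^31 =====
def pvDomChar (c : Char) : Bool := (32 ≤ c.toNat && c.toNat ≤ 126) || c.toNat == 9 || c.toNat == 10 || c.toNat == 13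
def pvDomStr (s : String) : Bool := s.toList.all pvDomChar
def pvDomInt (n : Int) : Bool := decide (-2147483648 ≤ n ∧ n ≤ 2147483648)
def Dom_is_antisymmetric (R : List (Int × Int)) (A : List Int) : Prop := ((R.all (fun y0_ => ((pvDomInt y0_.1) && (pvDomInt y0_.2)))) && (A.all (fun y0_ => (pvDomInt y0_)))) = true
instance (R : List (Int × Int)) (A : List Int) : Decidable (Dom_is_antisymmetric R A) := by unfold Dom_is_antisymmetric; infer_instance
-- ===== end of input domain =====

-- B builds the reversed relation as a set, intersects it with R, and checks no
-- offending pair has both coordinates in A (idiomatic set algebra instead of A's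
-- nested A×A scan); return values are proved equal on all inputs.


-- ===== PORT A =====
-- outer 'for a in A' loop, carrying the shrinking copy B; inner 'for b in A'
-- with early 'return False' is List.any.  B.remove(a): 'none' cannot occur
-- for a set input (A has distinct elements), we continue with B unchanged there.
def pvALoop (R : List (Int × Int)) (A : List Int) (B : PySem.Set Int) : List Int → Bool
  | [] => true
  | a :: rest =>
    if A.any (fun b => R.contains (a, b) && R.contains (b, a)) then false
    else
      match PySem.Set.remove? B a with
      | some B' => pvALoop R A B' rest
      | none => pvALoop R A B rest

def is_antisymmetric (R : List (Int × Int)) (A : List Int) : Bool :=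
  let B := PySem.Set.ofList A   -- B = A.copy()
  pvALoop R A B A

-- ===== PORT B =====
def is_antisymmetric_alt (R : List (Int × Int)) (A : List Int) : Bool :=
  let rev := PySem.Set.ofList (R.map (fun p => (p.2, p.1)))
  let overlap := PySem.Set.inter (PySem.Set.ofList R) rev
  overlap.all (fun p => !(A.contains p.1 && A.contains p.2))

-- ===== PRECONDITION & SPEC =====
def Spec_is_antisymmetric (R : List (Int × Int)) (A : List Int) (out : Bool) : Prop := out = is_antisymmetric_alt R A
instance (R : List (Int × Int)) (A : List Int) (out : Bool) : Decidable (Spec_is_antisymmetric R A out) := by unfold Spec_is_antisymmetric; infer_instance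

-- ===== CLAIM (what is proved, stated in full; the proofs are below) =====
def Claim_equal_is_antisymmetric : Prop := ∀ (R : List (Int × Int)) (A : List Int), Dom_is_antisymmetric R A → Spec_is_antisymmetric R A (is_antisymmetric R A)

-- ===== LEMMAS AND PROOFS =====

-- The carried copy B never influences the result of A's loop.
theorem pvALoop_eq_all (R : List (Int × Int)) (A : List Int) (l : List Int)
    (B : PySem.Set Int) :
    pvALoop R A B l
      = l.all (fun a => !(A.any (fun b => R.contains (a, b) && R.contains (b, a)))) := by
  induction l generalizing B with
  | nil => rfl
  | cons a rest ih =>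
    rw [List.all_cons, pvALoop]
    by_cases h : (A.any fun b => R.contains (a, b) && R.contains (b, a)) = true
    · rw [if_pos h, h]
      simp
    · rw [if_neg h]
      rw [Bool.not_eq_true] at h
      cases PySem.Set.remove? B a with
      | some B' =>
        refine (ih B').trans ?_
        rw [h]
        simp
      | none =>
        refine (ih B).trans ?_
        rw [h]
        simp

-- A's loop result, rephrased, equals B's overlap test: pure set logic.
theorem pvAllEqOverlap (R : List (Int × Int)) (A : List Int) :
    (A.all (fun a => !(A.any (fun b => R.contains (a, b) && R.contains (b, a)))))
    = (PySem.Set.inter (PySem.Set.ofList R) (PySem.Set.ofList (R.map (fun p => (p.2, p.1))))).all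
        (fun p => !(A.contains p.1 && A.contains p.2)) := by
  rw [Bool.eq_iff_iff]
  simp only [List.all_eq_true, Bool.not_eq_true', List.any_eq_false, Bool.and_eq_false_iff,
    List.contains_eq_mem, decide_eq_false_iff_not, Bool.and_eq_true, decide_eq_true_eq, not_and,
    PySem.Set.mem_inter, PySem.Set.mem_ofList, List.mem_map]
  constructor
  · rintro h p ⟨hpR, q, hqR, hq⟩
    have hq2 : q = (p.2, p.1) := by cases p; cases q; simp_all [Prod.ext_iff]
    by_cases hp1 : p.1 ∈ A
    · by_cases hp2 : p.2 ∈ A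
      · exact absurd (hq2 ▸ hqR) (h p.1 hp1 p.2 hp2 hpR)
      · exact Or.inr hp2
    · exact Or.inl hp1
  · intro h a _ b hb
    by_cases hab : (a, b) ∈ R
    · intro _ hba
      rcases h (a, b) ⟨hab, (b, a), hba, rfl⟩ with h1 | h1
      · exact h1 ‹a ∈ A›
      · exact h1 hb
    · intro hab2 _
      exact hab hab2

theorem pvPorts_eq (R : List (Int × Int)) (A : List Int) :
    is_antisymmetric R A = is_antisymmetric_alt R A := by
  unfold is_antisymmetric is_antisymmetric_alt
  rw [pvALoop_eq_all]
  exact pvAllEqOverlap R A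

-- ===== VERDICT (by name: the statement is the Claim_ definition above) =====
theorem is_antisymmetric_spec : Claim_equal_is_antisymmetric := by
  intro R A _
  unfold Spec_is_antisymmetric
  exact pvPorts_eq R A
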